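-- pv_equiv track=rewrite | github.com/jbskaggs/Assembler | main.py | formatPath
-- ===== SOURCE A (Python) =====
-- def formatPath(cycleList, end):
--     cycleList = [str(i) for i in cycleList]
--     foundEnd = False
--     endpath = []
--     startpath = []
--     for el in cycleList:
--         if el == end:
--             foundEnd = True
--             endpath.append(el)
--         elif foundEnd:
--             startpath.append(el)
--         else:
--             endpath.append(el)
--
--     startpath.extend(endpath)
--     return startpath
-- ===== SOURCE B (Python) =====
-- def formatPath(cycleList, end):
--     strs = [str(i) for i in cycleList]
--     if end not in strs:
--         return strs
--     idx = strs.index(end)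
--     after = [x for x in strs[idx + 1:] if x != end]
--     ends = [x for x in strs if x == end]
--     return after + strs[:idx] + ends
-- ===== Notes on version B (the rewrite author's own statement) =====
-- stated objective: alternative
-- what changed: Replaced A's single stateful flag-loop (foundEnd + two accumulators) with an index-find plus three slice/filter passes (elements after the first 'end' that differ from it, the prefix before it, then all 'end' occurrences), concatenated.
import Mathlib
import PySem

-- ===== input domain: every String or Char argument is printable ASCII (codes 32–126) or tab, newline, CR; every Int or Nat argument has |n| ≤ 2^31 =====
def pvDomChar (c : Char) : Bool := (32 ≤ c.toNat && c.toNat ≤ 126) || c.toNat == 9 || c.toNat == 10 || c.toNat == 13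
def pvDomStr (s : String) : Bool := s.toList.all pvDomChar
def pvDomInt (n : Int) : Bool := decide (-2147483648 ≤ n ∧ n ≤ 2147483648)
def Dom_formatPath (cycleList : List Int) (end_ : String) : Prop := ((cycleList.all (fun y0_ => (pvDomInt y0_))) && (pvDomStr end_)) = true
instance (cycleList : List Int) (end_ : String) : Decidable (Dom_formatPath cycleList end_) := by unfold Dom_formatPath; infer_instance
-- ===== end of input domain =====

-- B replaces A's stateful flag-loop by an index-find plus three slice/filter passes (alternative decomposition; return value only).

-- ===== PORT A =====
-- the loop body: state (foundEnd, endpath, startpath)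
def formatPathStep (end_ : String) (s : Bool × List String × List String) (el : String) :
    Bool × List String × List String :=
  if el = end_ then (true, s.2.1 ++ [el], s.2.2)
  else if s.1 then (s.1, s.2.1, s.2.2 ++ [el])
  else (s.1, s.2.1 ++ [el], s.2.2)

def formatPath (cycleList : List Int) (end_ : String) : List String :=
  let strs := cycleList.map PySem.Int.toStr
  let st := strs.foldl (formatPathStep end_) (false, [], [])
  st.2.2 ++ st.2.1

-- ===== PORT B =====
def formatPath_alt (cycleList : List Int) (end_ : String) : List String :=
  let strs := cycleList.map PySem.Int.toStr
  if end_ ∈ strs then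
    match PySem.List.index? strs end_ with
    | none => strs  -- unreachable: end_ ∈ strs
    | some idx =>
      let after := (PySem.List.slice strs (some ((idx : Int) + 1)) none).filter (fun x => !(x == end_))
      let ends := strs.filter (fun x => x == end_)
      after ++ PySem.List.slice strs none (some (idx : Int)) ++ ends
  else strs

-- ===== PRECONDITION & SPEC =====
def Spec_formatPath (cycleList : List Int) (end_ : String) (out : List String) : Prop := out = formatPath_alt cycleList end_
instance (cycleList : List Int) (end_ : String) (out : List String) : Decidable (Spec_formatPath cycleList end_ out) := by unfold Spec_formatPath; infer_instance

-- ===== CLAIM (what is proved, stated in full; the proofs are below) =====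
def Claim_equal_formatPath : Prop := ∀ (cycleList : List Int) (end_ : String), Dom_formatPath cycleList end_ → Spec_formatPath cycleList end_ (formatPath cycleList end_)

-- ===== LEMMAS AND PROOFS =====

-- after the flag is set: '= end_' elements go to endpath, others to startpath
theorem foldl_step_found (end_ : String) (l : List String) (endp sp : List String) :
    l.foldl (formatPathStep end_) (true, endp, sp) =
      (true, endp ++ l.filter (fun x => x == end_), sp ++ l.filter (fun x => !(x == end_))) := by
  induction l generalizing endp sp with
  | nil => simp
  | cons h t ih =>
    by_cases hh : h = end_ <;>
      simp [formatPathStep, hh, ih]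

-- main invariant: loop result characterised by the first index of end_
theorem foldl_step_main (end_ : String) (l : List String) (endp : List String) :
    (fun st => st.2.2 ++ st.2.1) (l.foldl (formatPathStep end_) (false, endp, [])) =
      match PySem.List.index? l end_ with
      | none => endp ++ l
      | some idx =>
          (l.drop (idx + 1)).filter (fun x => !(x == end_)) ++ endp ++ l.take idx
            ++ l.filter (fun x => x == end_) := by
  induction l generalizing endp with
  | nil => simp [PySem.List.index?]
  | cons h t ih =>
    by_cases hh : h = end_
    · subst hh
      rw [PySem.List.index?_cons_self]
      simp [formatPathStep, foldl_step_found]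
    · rw [PySem.List.index?_cons_of_ne t hh]
      have step : (h :: t).foldl (formatPathStep end_) (false, endp, []) =
          t.foldl (formatPathStep end_) (false, endp ++ [h], []) := by
        simp [formatPathStep, hh]
      rw [step]
      rw [ih (endp ++ [h])]
      cases hidx : PySem.List.index? t end_ with
      | none => simp
      | some i => simp [hh]

theorem formatPath_eq (cycleList : List Int) (end_ : String) :
    formatPath cycleList end_ = formatPath_alt cycleList end_ := by
  unfold formatPath formatPath_alt
  set strs := cycleList.map PySem.Int.toStr with hstrs
  have := foldl_step_main end_ strs []
  simp only at this
  rw [this]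
  by_cases hmem : end_ ∈ strs
  · rw [if_pos hmem]
    cases hidx : PySem.List.index? strs end_ with
    | none =>
      exact absurd ((PySem.List.index?_eq_none_iff strs end_).mp hidx) (by simp [hmem])
    | some idx =>
      have h1 : PySem.List.slice strs (some ((idx : Int) + 1)) none = strs.drop (idx + 1) := by
        have : ((idx : Int) + 1) = ((idx + 1 : Nat) : Int) := by push_cast; ring
        rw [this, PySem.List.slice_from_natCast]
      have h2 : PySem.List.slice strs none (some (idx : Int)) = strs.take idx :=
        PySem.List.slice_to_natCast _ _
      simp only [h1, h2]
      simp
  · rw [if_neg hmem]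
    have hn : PySem.List.index? strs end_ = none := (PySem.List.index?_eq_none_iff strs end_).mpr hmem
    rw [hn]
    simp

-- ===== VERDICT (by name: the statement is the Claim_ definition above) =====
theorem formatPath_spec : Claim_equal_formatPath := by
  intro cycleList end_ _
  exact formatPath_eq cycleList end_
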